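-- pv_equiv track=rewrite | github.com/noszczyn/rpi-obd2-led-dash | src/display.py | _build_rpm_index
-- ===== SOURCE A (Python) =====
-- def _build_rpm_index(led_count: int, led_y: int) -> list[int]:
--     rpm_index: list[int] = []
--     for i in range(led_count):
--         column = i // led_y
--         row = i % led_y
--         if column % 2 == 1:
--             row = led_y - 1 - row
--         if row == 0:
--             rpm_index.append(i)
--     return rpm_index
-- ===== SOURCE B (Python) =====
-- def _build_rpm_index(led_count: int, led_y: int) -> list[int]:
--     # Walk column by column: each column of the snake layout contains exactly
--     # one index whose (possibly flipped) row is 0 -- the column's first index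
--     # for even columns, its last index for odd columns.
--     rpm_index: list[int] = []
--     base = 0
--     c = 0
--     while base < led_count:
--         i = base if c % 2 == 0 else base + led_y - 1
--         if i < led_count:
--             rpm_index.append(i)
--         base += led_y
--         c += 1
--     return rpm_index
-- ===== Notes on version B (the rewrite author's own statement) =====
-- stated objective: faster
-- what changed: B walks column by column emitting the single qualifying index per column (base for even columns, base+led_y-1 for odd ones) instead of scanning every LED index and computing its snake row.
-- outside the precondition, e.g. on _build_rpm_index(5, -2): A returns [0, 4], B does not finish within the time limit
import Mathlib
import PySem

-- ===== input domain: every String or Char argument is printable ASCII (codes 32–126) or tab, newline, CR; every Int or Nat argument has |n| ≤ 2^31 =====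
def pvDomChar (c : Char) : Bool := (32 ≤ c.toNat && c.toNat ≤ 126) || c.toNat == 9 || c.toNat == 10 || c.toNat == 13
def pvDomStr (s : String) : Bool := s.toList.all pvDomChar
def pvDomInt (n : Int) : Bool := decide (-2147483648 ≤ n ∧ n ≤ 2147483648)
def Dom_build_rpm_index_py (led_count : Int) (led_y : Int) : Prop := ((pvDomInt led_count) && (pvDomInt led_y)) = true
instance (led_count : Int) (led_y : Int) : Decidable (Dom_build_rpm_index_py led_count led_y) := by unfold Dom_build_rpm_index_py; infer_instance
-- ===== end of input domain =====

-- B walks column by column, emitting the one qualifying index per column, instead of scanning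
-- every LED index; objective: faster (O(led_count/led_y) columns instead of led_count indices).

-- ===== PORT A =====
def build_rpm_index_py (led_count : Int) (led_y : Int) : List Int :=
  (PySem.List.pyRange 0 led_count 1).foldl (fun rpm_index i =>
    let column := PySem.Int.floordiv i led_y
    let row0 := PySem.Int.mod i led_y
    let row := if PySem.Int.mod column 2 = 1 then led_y - 1 - row0 else row0
    if row = 0 then rpm_index ++ [i] else rpm_index) []

-- ===== PORT B =====
-- the `led_y < 1` guard only makes the Python while-loop's recursion total in Lean
-- (for led_y < 1 and 0 < led_count the Python loop does not terminate; such inputs are outside Pre_)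
def bGo (led_count : Int) (led_y : Int) (base : Int) (c : Int) : List Int :=
  if _hy : led_y < 1 then []
  else if _hb : base < led_count then
    (if (if PySem.Int.mod c 2 = 0 then base else base + led_y - 1) < led_count
      then [if PySem.Int.mod c 2 = 0 then base else base + led_y - 1] else [])
    ++ bGo led_count led_y (base + led_y) (c + 1)
  else []
termination_by (led_count - base).toNat
decreasing_by omega

def build_rpm_index_py_alt (led_count : Int) (led_y : Int) : List Int :=
  bGo led_count led_y 0 0

-- ===== PRECONDITION & SPEC =====
-- Pre_ excludes led_y = 0 with 0 < led_count, where A raises ZeroDivisionError, and restricts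
-- to the natural domain led_y ≥ 1 (led_y is a row height): for negative led_y A still returns a
-- value but B's column-stepping loop diverges, so those inputs are excluded as well.
def Pre_build_rpm_index_py (led_count : Int) (led_y : Int) : Prop :=
  led_count ≤ 0 ∨ 1 ≤ led_y
instance (led_count : Int) (led_y : Int) : Decidable (Pre_build_rpm_index_py led_count led_y) := by unfold Pre_build_rpm_index_py; infer_instance
def pvWitness_build_rpm_index_py : Int × Int := (12, 3)

def Spec_build_rpm_index_py (led_count : Int) (led_y : Int) (out : List Int) : Prop := out = build_rpm_index_py_alt led_count led_y
instance (led_count : Int) (led_y : Int) (out : List Int) : Decidable (Spec_build_rpm_index_py led_count led_y out) := by unfold Spec_build_rpm_index_py; infer_instance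

-- ===== CLAIM (what is proved, stated in full; the proofs are below) =====
def Claim_equal_build_rpm_index_py : Prop := ∀ (led_count : Int) (led_y : Int), Dom_build_rpm_index_py led_count led_y → Pre_build_rpm_index_py led_count led_y → Spec_build_rpm_index_py led_count led_y (build_rpm_index_py led_count led_y)

-- ===== LEMMAS AND PROOFS =====

-- the per-index test of A, as a predicate
abbrev aTest (led_y : Int) (i : Int) : Prop :=
  (if PySem.Int.mod (PySem.Int.floordiv i led_y) 2 = 1
    then led_y - 1 - PySem.Int.mod i led_y
    else PySem.Int.mod i led_y) = 0

theorem a_eq_filter (led_count led_y : Int) :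
    build_rpm_index_py led_count led_y
      = (PySem.List.pyRange 0 led_count 1).filter (fun i => decide (aTest led_y i)) := by
  unfold build_rpm_index_py aTest
  exact PySem.List.foldl_append_ite_eq_filter _ _ _

-- filtering a unit-step range for a single value
theorem filter_range_eq_value (a b q : Int) :
    (PySem.List.pyRange a b 1).filter (fun i => decide (i = q))
      = if a ≤ q ∧ q < b then [q] else [] := by
  by_cases hab : b ≤ a
  · rw [PySem.List.pyRange_one_eq_nil hab]
    simp only [List.filter_nil]
    rw [if_neg (by omega)]
  · have h : (b - (a+1)).toNat < (b - a).toNat := by omega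
    rw [PySem.List.pyRange_one_cons (by omega)]
    rw [List.filter_cons]
    by_cases haq : a = q
    · subst haq
      have : (PySem.List.pyRange (a+1) b 1).filter (fun i => decide (i = a)) = [] := by
        rw [List.filter_eq_nil_iff]
        intro x hx
        have := (PySem.List.mem_pyRange_one).1 hx
        simp only [decide_eq_true_eq]
        omega
      simp only [decide_eq_true_eq, this]
      rw [if_pos (show a ≤ a ∧ a < b by omega)]
      simp
    · simp only [decide_eq_true_eq, if_neg haq]
      rw [filter_range_eq_value (a+1) b q]
      by_cases hc : a + 1 ≤ q ∧ q < b
      · rw [if_pos hc, if_pos (by omega)]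
      · rw [if_neg hc, if_neg (by omega)]
termination_by (b - a).toNat
decreasing_by all_goals omega

-- characterization of aTest inside a column
theorem aTest_iff (led_y c i : Int) (hy : 1 ≤ led_y)
    (hlo : c * led_y ≤ i) (hhi : i < c * led_y + led_y) :
    aTest led_y i ↔ i = (if PySem.Int.mod c 2 = 0 then c * led_y else c * led_y + led_y - 1) := by
  have hdiv : PySem.Int.floordiv i led_y = c := by
    rw [PySem.Int.floordiv_eq_iff_of_pos (by omega)]
    constructor <;> nlinarith
  have hmod : PySem.Int.mod i led_y = i - c * led_y := by
    have := PySem.Int.floordiv_mul_add_mod i led_y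
    rw [hdiv] at this; omega
  have h2 : PySem.Int.mod c 2 = c % 2 := PySem.Int.mod_eq_emod_of_pos (by omega)
  unfold aTest
  rw [hdiv, hmod, h2]
  by_cases hpar : c % 2 = 1
  · rw [if_pos hpar, if_neg (by omega)]
    omega
  · rw [if_neg hpar, if_pos (by omega)]
    omega

-- the core invariant: A's filter from column boundary base = c*led_y equals B's loop
theorem filter_eq_bGo (led_count led_y c : Int) (hy : 1 ≤ led_y) (hc : 0 ≤ c) :
    (PySem.List.pyRange (c * led_y) led_count 1).filter (fun i => decide (aTest led_y i))
      = bGo led_count led_y (c * led_y) c := by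
  by_cases hend : led_count ≤ c * led_y
  · rw [PySem.List.pyRange_one_eq_nil hend, bGo]
    rw [dif_neg (by omega), dif_neg (by omega)]
    simp
  · have hmeas : (led_count - (c+1) * led_y).toNat < (led_count - c * led_y).toNat := by
      have hx : (c+1) * led_y = c * led_y + led_y := by ring
      omega
    set base := c * led_y with hbase
    set m := min (base + led_y) led_count with hm
    have hsplit := PySem.List.pyRange_one_append base m led_count (by omega) (by omega)
    rw [hsplit, List.filter_append]
    -- the chunk [base, m): exactly one qualifying index
    have hchunk : (PySem.List.pyRange base m 1).filter (fun i => decide (aTest led_y i))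
        = (PySem.List.pyRange base m 1).filter
            (fun i => decide (i = (if PySem.Int.mod c 2 = 0 then base else base + led_y - 1))) := by
      apply List.filter_congr
      intro i hi
      have hmem := (PySem.List.mem_pyRange_one).1 hi
      have hiff := aTest_iff led_y c i hy (by omega) (by omega)
      rw [decide_eq_decide]
      exact hiff
    rw [hchunk, filter_range_eq_value]
    -- the tail [m, led_count) filters like [base+led_y, led_count)
    have htail : (PySem.List.pyRange m led_count 1).filter (fun i => decide (aTest led_y i))
        = (PySem.List.pyRange (base + led_y) led_count 1).filter (fun i => decide (aTest led_y i)) := by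
      by_cases hcase : base + led_y ≤ led_count
      · have : m = base + led_y := by omega
        rw [this]
      · have h1 : m = led_count := by omega
        rw [h1, PySem.List.pyRange_one_eq_nil (by omega), PySem.List.pyRange_one_eq_nil (by omega)]
    have hrec : base + led_y = (c+1) * led_y := by ring
    rw [htail, hrec, filter_eq_bGo led_count led_y (c+1) hy (by omega)]
    -- unfold one step of bGo on the left target
    conv_rhs => rw [bGo]
    rw [dif_neg (by omega), dif_pos (by omega)]
    rw [← hrec]
    by_cases hpar : PySem.Int.mod c 2 = 0
    · rw [if_pos hpar]
      rw [if_pos (show base ≤ base ∧ base < m by omega),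
          if_pos (show base < led_count by omega)]
    · rw [if_neg hpar]
      by_cases hq : base + led_y - 1 < led_count
      · rw [if_pos (show base ≤ base + led_y - 1 ∧ base + led_y - 1 < m by omega), if_pos hq]
      · rw [if_neg (show ¬(base ≤ base + led_y - 1 ∧ base + led_y - 1 < m) by omega), if_neg hq]
termination_by (led_count - c * led_y).toNat
decreasing_by omega

-- ===== VERDICT (by name: the statement is the Claim_ definition above) =====
theorem build_rpm_index_py_spec : Claim_equal_build_rpm_index_py := by
  intro led_count led_y _hdom hpre
  unfold Spec_build_rpm_index_py build_rpm_index_py_alt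
  rw [a_eq_filter]
  by_cases hy : 1 ≤ led_y
  · have := filter_eq_bGo led_count led_y 0 hy (by omega)
    simpa using this
  · -- then led_count ≤ 0 by Pre_: both sides are empty
    have hlc : led_count ≤ 0 := by
      rcases hpre with h | h
      · exact h
      · omega
    rw [PySem.List.pyRange_one_eq_nil (by omega), bGo]
    by_cases h1 : led_y < 1
    · rw [dif_pos h1]; rfl
    · rw [dif_neg h1, dif_neg (by omega)]; rfl
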